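-- pv_equiv track=rewrite | github.com/bobrenjc93/pytorch | torch/distributed/torchmux_trace.py | _extract_phases
-- ===== SOURCE A (Python) =====
-- def _extract_phases(per_rank, nproc):
--     """
--     Split each worker's events into phases separated by collectives.
--     A phase is a dict mapping rank -> list of events between two
--     consecutive collective boundaries.
--     """
--     coll_indices = {r: [] for r in range(nproc)}
--     for r in range(nproc):
--         for i, (cat, name, start, dur) in enumerate(per_rank[r]):
--             if cat == "collective":
--                 coll_indices[r].append(i)
--
--     if not coll_indices.get(0):
--         return [{r: list(per_rank[r]) for r in range(nproc)}]
--
--     num_colls = len(coll_indices[0])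
--     phases = []
--
--     for ci in range(num_colls):
--         phase = {}
--         for r in range(nproc):
--             if ci >= len(coll_indices[r]):
--                 continue
--             end_idx = coll_indices[r][ci]
--             start_idx = coll_indices[r][ci - 1] + 1 if ci > 0 else 0
--             phase[r] = per_rank[r][start_idx : end_idx + 1]
--         phases.append(phase)
--
--     last_phase = {}
--     for r in range(nproc):
--         if coll_indices[r]:
--             last_idx = coll_indices[r][-1] + 1
--             if last_idx < len(per_rank[r]):
--                 last_phase[r] = per_rank[r][last_idx:]
--     if last_phase:
--         phases.append(last_phase)
--
--     return phases
-- ===== SOURCE B (Python) =====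
-- def _extract_phases(per_rank, nproc):
--     """One left-to-right pass per rank with a segment buffer (no index lists, no slicing)."""
--     ranks = range(nproc)
--     num_colls = 0
--     if nproc > 0:
--         num_colls = sum(1 for ev in per_rank[0] if ev[0] == "collective")
--     if num_colls == 0:
--         return [{r: list(per_rank[r]) for r in ranks}]
--     phases = [dict() for _ in range(num_colls)]
--     last_phase = {}
--     for r in ranks:
--         buf = []
--         seen = 0
--         for ev in per_rank[r]:
--             buf.append(ev)
--             if ev[0] == "collective":
--                 if seen < num_colls:
--                     phases[seen][r] = buf
--                 seen += 1
--                 buf = []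
--         if seen > 0 and buf:
--             last_phase[r] = buf
--     if last_phase:
--         phases.append(last_phase)
--     return phases
-- ===== Notes on version B (the rewrite author's own statement) =====
-- stated objective: alternative
-- what changed: Replaces A's two-level index bookkeeping (per-rank collective-index lists plus phase-major slicing of per_rank[r]) by a single left-to-right segmentation pass per rank with a current-segment buffer that writes each closed segment straight into its phase dict.
import Mathlib
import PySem

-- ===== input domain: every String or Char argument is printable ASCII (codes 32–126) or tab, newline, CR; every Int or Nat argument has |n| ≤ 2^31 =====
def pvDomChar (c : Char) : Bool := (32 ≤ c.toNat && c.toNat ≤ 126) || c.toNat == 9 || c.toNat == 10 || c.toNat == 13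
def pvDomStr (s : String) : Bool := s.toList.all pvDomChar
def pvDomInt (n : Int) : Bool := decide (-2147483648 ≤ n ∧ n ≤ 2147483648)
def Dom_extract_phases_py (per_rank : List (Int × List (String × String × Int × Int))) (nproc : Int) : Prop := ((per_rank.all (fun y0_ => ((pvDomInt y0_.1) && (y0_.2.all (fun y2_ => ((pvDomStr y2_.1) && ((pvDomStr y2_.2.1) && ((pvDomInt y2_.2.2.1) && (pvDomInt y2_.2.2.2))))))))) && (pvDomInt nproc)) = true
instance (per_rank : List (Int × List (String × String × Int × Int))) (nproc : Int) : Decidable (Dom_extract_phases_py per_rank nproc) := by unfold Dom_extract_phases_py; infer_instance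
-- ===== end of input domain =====

-- B replaces A's collective-index lists + phase-major slicing by one buffered segmentation pass per rank (alternative decomposition, same cost).

abbrev pvEV : Type := String × String × Int × Int

-- per_rank[r]: Python dict access; total via default [] (Pre_ guarantees the key exists)
def pvEvts (per_rank : List (Int × List pvEV)) (r : Int) : List pvEV :=
  PySem.Dict.getD (PySem.Dict.mk per_rank) r []

-- ===== PORT A =====
-- indices i with per_rank[r][i] a collective (the inner 'for i, (cat, …) in enumerate' loop)
def pvCollIdx (evs : List pvEV) : List Int :=
  (PySem.List.enumerate evs).foldl
    (fun acc ie => if ie.2.1 == "collective" then acc ++ [ie.1] else acc) []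

def extract_phases_py (per_rank : List (Int × List pvEV)) (nproc : Int) : List (List (Int × List pvEV)) :=
  let ranks := PySem.List.pyRange 0 nproc 1
  let coll : PySem.Dict Int (List Int) :=
    PySem.Dict.mk (ranks.map (fun r => (r, pvCollIdx (pvEvts per_rank r))))
  if PySem.Dict.getD coll 0 [] = [] then
    [ranks.map (fun r => (r, pvEvts per_rank r))]
  else
    let num_colls : Int := ((PySem.Dict.getD coll 0 []).length : Int)
    let phases := (PySem.List.pyRange 0 num_colls 1).foldl (fun phases ci =>
      let phase := ranks.foldl (fun phase r =>
        let cr := PySem.Dict.getD coll r []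
        if ci < (cr.length : Int) then
          let end_idx := PySem.List.pyGetD cr ci 0
          let start_idx := if 0 < ci then PySem.List.pyGetD cr (ci - 1) 0 + 1 else 0
          phase ++ [(r, PySem.List.slice (pvEvts per_rank r) (some start_idx) (some (end_idx + 1)))]
        else phase) []
      phases ++ [phase]) []
    let last_phase := ranks.foldl (fun lp r =>
      let cr := PySem.Dict.getD coll r []
      if cr ≠ [] then
        let last_idx := PySem.List.pyGetD cr (-1) 0 + 1
        if last_idx < ((pvEvts per_rank r).length : Int) then
          lp ++ [(r, PySem.List.slice (pvEvts per_rank r) (some last_idx) none)]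
        else lp
      else lp) []
    if last_phase = [] then phases else phases ++ [last_phase]

-- ===== PORT B =====
-- one step of B's inner loop: state = (phases, buf, seen)
def pvSegStep (r : Int) (num_colls : Int)
    (s : List (List (Int × List pvEV)) × List pvEV × Int) (ev : pvEV) :
    List (List (Int × List pvEV)) × List pvEV × Int :=
  let buf := s.2.1 ++ [ev]
  if ev.1 == "collective" then
    ((if s.2.2 < num_colls then s.1.modify s.2.2.toNat (fun ph => ph ++ [(r, buf)]) else s.1),
      [], s.2.2 + 1)
  else (s.1, buf, s.2.2)

def extract_phases_py_alt (per_rank : List (Int × List pvEV)) (nproc : Int) : List (List (Int × List pvEV)) :=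
  let ranks := PySem.List.pyRange 0 nproc 1
  let num_colls : Int :=
    if 0 < nproc then ((pvEvts per_rank 0).countP (fun ev => ev.1 == "collective") : Int) else 0
  if num_colls = 0 then
    [ranks.map (fun r => (r, pvEvts per_rank r))]
  else
    let st := ranks.foldl (fun st r =>
      let res := (pvEvts per_rank r).foldl (pvSegStep r num_colls) (st.1, [], 0)
      (res.1, if 0 < res.2.2 ∧ res.2.1 ≠ [] then st.2 ++ [(r, res.2.1)] else st.2))
      (List.replicate num_colls.toNat [], ([] : List (Int × List pvEV)))
    if st.2 = [] then st.1 else st.1 ++ [st.2]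

-- ===== PRECONDITION & SPEC =====
-- Pre_ excludes exactly the inputs on which Python A raises KeyError: a rank in range(nproc)
-- missing from per_rank.  The conjunct 'nproc ≤ per_rank.length' excludes nothing extra (with
-- fewer than nproc entries some rank in range(nproc) is always missing from the dict); it only
-- lets the Decidable instance stop fast for huge nproc.
def Pre_extract_phases_py (per_rank : List (Int × List pvEV)) (nproc : Int) : Prop :=
  nproc ≤ (per_rank.length : Int) ∧
    ∀ r ∈ PySem.List.pyRange 0 nproc 1, PySem.Dict.contains (PySem.Dict.mk per_rank) r = true
instance (per_rank : List (Int × List pvEV)) (nproc : Int) : Decidable (Pre_extract_phases_py per_rank nproc) := by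
  unfold Pre_extract_phases_py; infer_instance
def pvWitness_extract_phases_py : (List (Int × List pvEV)) × Int :=
  ([(0, [("collective", "allreduce", 0, 1), ("compute", "gemm", 1, 2)])], 1)

def Spec_extract_phases_py (per_rank : List (Int × List pvEV)) (nproc : Int) (out : List (List (Int × List pvEV))) : Prop := out = extract_phases_py_alt per_rank nproc
instance (per_rank : List (Int × List pvEV)) (nproc : Int) (out : List (List (Int × List pvEV))) : Decidable (Spec_extract_phases_py per_rank nproc out) := by unfold Spec_extract_phases_py; exact @instDecidableEqList _ (@instDecidableEqList _ (fun a b => inferInstance)) _ _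

-- ===== CLAIM (what is proved, stated in full; the proofs are below) =====
def Claim_equal_extract_phases_py : Prop := ∀ (per_rank : List (Int × List pvEV)) (nproc : Int), Dom_extract_phases_py per_rank nproc → Pre_extract_phases_py per_rank nproc → Spec_extract_phases_py per_rank nproc (extract_phases_py per_rank nproc)

-- ===== LEMMAS AND PROOFS =====

-- collective test
def pvCat (ev : pvEV) : Bool := ev.1 == "collective"

-- Nat-valued head recursion computing the collective indices
def pvCIdxN : List pvEV → List Nat
  | [] => []
  | e :: t => (if pvCat e then [0] else []) ++ (pvCIdxN t).map (· + 1)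

-- left-to-right segmentation: (closed segments, leftover)
def pvChunks : List pvEV → List (List pvEV) × List pvEV
  | [] => ([], [])
  | e :: t =>
    let p := pvChunks t
    if pvCat e then ([e] :: p.1, p.2)
    else match p.1 with
      | [] => ([], e :: p.2)
      | c :: cs => ((e :: c) :: cs, p.2)

-- segmentation with an open buffer (mirrors B's inner loop)
def pvSegs : List pvEV → List pvEV → List (List pvEV) × List pvEV
  | buf, [] => ([], buf)
  | buf, e :: t =>
    if pvCat e then ((buf ++ [e]) :: (pvSegs [] t).1, (pvSegs [] t).2)
    else pvSegs (buf ++ [e]) t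

-- what B's inner loop does to the phases list
def pvApply (r : Int) (n : Int) : List (List (Int × List pvEV)) → Int → List (List pvEV) → List (List (Int × List pvEV))
  | phases, _, [] => phases
  | phases, seen, s :: ss =>
    pvApply r n (if seen < n then phases.modify seen.toNat (fun ph => ph ++ [(r, s)]) else phases) (seen + 1) ss

-- the start index of phase j (as A computes it)
def pvStartN (cI : List Nat) (j : Nat) : Nat :=
  if j = 0 then 0 else cI.getD (j - 1) 0 + 1

theorem pvCIdxN_length (evs : List pvEV) :
    (pvCIdxN evs).length = evs.countP pvCat := by
  induction evs with
  | nil => rfl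
  | cons e t ih => simp [pvCIdxN, List.countP_cons]; split <;> simp [ih] <;> omega

theorem pvChunks_length (evs : List pvEV) :
    ((pvChunks evs).1).length = evs.countP pvCat := by
  induction evs with
  | nil => rfl
  | cons e t ih =>
    simp only [pvChunks, List.countP_cons]
    by_cases h : pvCat e
    · simp [h, ih]
    · simp only [h]
      cases hc : (pvChunks t).1 with
      | nil => rw [hc] at ih; simp at ih ⊢; omega
      | cons c cs => rw [hc] at ih; simp at ih ⊢; omega

theorem pvChunks_join (evs : List pvEV) :
    ((pvChunks evs).1).flatten ++ (pvChunks evs).2 = evs := by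
  induction evs with
  | nil => rfl
  | cons e t ih =>
    simp only [pvChunks]
    by_cases h : pvCat e
    · simp [h]; simpa using ih
    · simp only [h]
      cases hc : (pvChunks t).1 with
      | nil => rw [hc] at ih; simp at ih ⊢; exact ih
      | cons c cs => rw [hc] at ih; simp at ih ⊢; simpa using ih

theorem pvEnum_filter (t : List pvEV) :
    ∀ s : Int, ((PySem.List.enumerate t s).filter (fun ie => ie.2.1 == "collective")).map (·.1)
      = (pvCIdxN t).map (fun n : Nat => (n : Int) + s) := by
  induction t with
  | nil => intro s; simp [pvCIdxN, PySem.List.enumerate]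
  | cons e t ih =>
    intro s
    rw [PySem.List.enumerate_cons, List.filter_cons]
    have hmapmap : (((pvCIdxN t).map (· + 1)).map (fun n : Nat => (n : Int) + s))
        = (pvCIdxN t).map (fun n : Nat => (n : Int) + (s + 1)) := by
      rw [List.map_map]; apply List.map_congr_left; intro n _
      simp [Function.comp]; push_cast; ring
    by_cases h : pvCat e
    · have h' : ((s, e).2.1 == "collective") = true := by simpa [pvCat] using h
      rw [if_pos h', List.map_cons, ih]
      simp only [pvCIdxN, h, if_pos, List.singleton_append, List.map_cons, hmapmap]
      simp
    · have h' : ¬ ((s, e).2.1 == "collective") = true := by simpa [pvCat] using h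
      rw [if_neg h', ih]
      simp only [pvCIdxN, h, if_neg, List.nil_append, hmapmap]
      simp
      intro a _
      push_cast; ring

theorem pvCollIdx_eq (evs : List pvEV) :
    pvCollIdx evs = (pvCIdxN evs).map (fun n : Nat => (n : Int)) := by
  unfold pvCollIdx
  simp only [PySem.List.foldl_append_if]
  simpa using pvEnum_filter evs 0

theorem pvSegs_eq (t : List pvEV) : ∀ buf,
    pvSegs buf t =
      (match (pvChunks t).1 with
        | [] => ([], buf ++ (pvChunks t).2)
        | c :: cs => ((buf ++ c) :: cs, (pvChunks t).2)) := by
  induction t with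
  | nil => intro buf; simp [pvSegs, pvChunks]
  | cons e t ih =>
    intro buf
    by_cases h : pvCat e
    · have h0 : pvSegs [] t = pvChunks t := by
        rw [ih []]
        cases hc : (pvChunks t).1 with
        | nil => simp [Prod.ext_iff, hc]
        | cons c cs => simp [Prod.ext_iff, hc]
      simp [pvSegs, h, pvChunks, h0]
    · simp only [pvSegs, h, if_neg, pvChunks]
      rw [ih (buf ++ [e])]
      cases hc : (pvChunks t).1 with
      | nil => simp [h, hc]
      | cons c cs => simp [h, hc]

theorem pvSegs_nil_eq (t : List pvEV) : pvSegs [] t = pvChunks t := by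
  rw [pvSegs_eq t []]
  cases hc : (pvChunks t).1 with
  | nil => simp [Prod.ext_iff, hc]
  | cons c cs => simp [Prod.ext_iff, hc]

theorem pvFold_segStep (r n : Int) (evs : List pvEV) :
    ∀ (buf : List pvEV) (seen : Int) (phases : List (List (Int × List pvEV))),
      evs.foldl (pvSegStep r n) (phases, buf, seen) =
        (pvApply r n phases seen (pvSegs buf evs).1, (pvSegs buf evs).2,
          seen + ((pvSegs buf evs).1.length : Int)) := by
  induction evs with
  | nil => intro buf seen phases; simp [pvSegs, pvApply]
  | cons e t ih =>
    intro buf seen phases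
    by_cases h : pvCat e
    · simp only [pvCat] at h
      simp only [List.foldl_cons, pvSegStep, h, if_pos]
      rw [ih [] (seen + 1)]
      have hseg : pvSegs buf (e :: t) = ((buf ++ [e]) :: (pvSegs [] t).1, (pvSegs [] t).2) := by
        simp [pvSegs, pvCat, h]
      rw [hseg]
      simp [pvApply]
      ring
    · simp only [pvCat] at h
      simp only [List.foldl_cons, pvSegStep, h, Bool.false_eq_true, if_false]
      rw [ih (buf ++ [e]) seen]
      have hseg : pvSegs buf (e :: t) = pvSegs (buf ++ [e]) t := by
        simp [pvSegs, pvCat, h]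
      rw [hseg]

theorem pvGetD_map_succ (l : List Nat) (k : Nat) (h : k < l.length) :
    (l.map (· + 1)).getD k 0 = l.getD k 0 + 1 := by
  rw [List.getD_eq_getElem _ _ (by simpa using h), List.getD_eq_getElem _ _ h, List.getElem_map]

theorem pvStartN_cons_coll (l : List Nat) (k : Nat) (hk : k < l.length) :
    pvStartN (0 :: l.map (· + 1)) (k + 1) = pvStartN l k + 1 := by
  cases k with
  | zero => simp [pvStartN]
  | succ k' =>
    simp only [pvStartN, Nat.succ_ne_zero, if_neg, Nat.add_sub_cancel]
    rw [List.getD_cons_succ, pvGetD_map_succ l k' (by omega)]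
    simp

theorem pvStartN_map_succ (l : List Nat) (k : Nat) (hk : k < l.length) :
    pvStartN (l.map (· + 1)) (k + 1) = pvStartN l (k + 1) + 1 := by
  simp only [pvStartN, Nat.succ_ne_zero, if_neg, Nat.add_sub_cancel]
  rw [pvGetD_map_succ l k (by omega)]
  simp

theorem pvSlice_chunk (evs : List pvEV) :
    ∀ j, j < (pvCIdxN evs).length →
      (evs.drop (pvStartN (pvCIdxN evs) j)).take ((pvCIdxN evs).getD j 0 + 1 - pvStartN (pvCIdxN evs) j)
        = ((pvChunks evs).1).getD j [] := by
  induction evs with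
  | nil => intro j hj; simp [pvCIdxN] at hj
  | cons e t ih =>
    intro j hj
    by_cases h : pvCat e
    · simp only [pvCIdxN, h, if_pos, List.singleton_append] at hj ⊢
      simp only [pvChunks, h, if_pos]
      cases j with
      | zero => simp [pvStartN]
      | succ k =>
        have hk : k < (pvCIdxN t).length := by simpa using hj
        rw [pvStartN_cons_coll _ k hk, List.getD_cons_succ, pvGetD_map_succ _ k hk]
        simp only [List.drop_succ_cons, List.getD_cons_succ]
        have harith : (pvCIdxN t).getD k 0 + 1 + 1 - (pvStartN (pvCIdxN t) k + 1)
            = (pvCIdxN t).getD k 0 + 1 - pvStartN (pvCIdxN t) k := by omega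
        rw [harith, ih k hk]
    · simp only [pvCIdxN, h, Bool.false_eq_true, if_false, List.nil_append] at hj ⊢
      have hlen : j < (pvCIdxN t).length := by simpa using hj
      have hne : (pvChunks t).1 ≠ [] := by
        have h1 := pvCIdxN_length t
        have h2 := pvChunks_length t
        intro hc; rw [hc] at h2; simp at h2; omega
      obtain ⟨c, cs, hc⟩ := List.exists_cons_of_ne_nil hne
      simp only [pvChunks, h, Bool.false_eq_true, if_false, hc]
      cases j with
      | zero =>
        have h0 := ih 0 (by omega)
        simp only [pvStartN, if_pos, List.drop_zero, Nat.sub_zero] at h0 ⊢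
        rw [pvGetD_map_succ _ 0 hlen]
        rw [List.take_succ_cons]
        rw [h0, hc]
        simp
      | succ k =>
        rw [pvStartN_map_succ _ k (by omega), pvGetD_map_succ _ (k+1) hlen]
        simp only [List.drop_succ_cons]
        have harith : (pvCIdxN t).getD (k+1) 0 + 1 + 1 - (pvStartN (pvCIdxN t) (k+1) + 1)
            = (pvCIdxN t).getD (k+1) 0 + 1 - pvStartN (pvCIdxN t) (k+1) := by omega
        rw [harith, ih (k+1) hlen, hc]
        simp

theorem pvDrop_last (evs : List pvEV) (h : pvCIdxN evs ≠ []) :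
    evs.drop ((pvCIdxN evs).getD ((pvCIdxN evs).length - 1) 0 + 1) = (pvChunks evs).2 ∧
    (pvCIdxN evs).getD ((pvCIdxN evs).length - 1) 0 + 1 + (pvChunks evs).2.length = evs.length := by
  induction evs with
  | nil => simp [pvCIdxN] at h
  | cons e t ih =>
    by_cases hcat : pvCat e
    · simp only [pvCIdxN, hcat, if_pos, List.singleton_append] at h ⊢
      simp only [pvChunks, hcat, if_pos]
      by_cases hl : pvCIdxN t = []
      · have hch : (pvChunks t).1 = [] := by
          have h1 := pvCIdxN_length t
          have h2 := pvChunks_length t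
          rw [hl] at h1; simp at h1
          exact List.length_eq_zero_iff.mp (by omega)
        have hlo : (pvChunks t).2 = t := by
          have := pvChunks_join t; rw [hch] at this; simpa using this
        simp [hl, hlo]
        omega
      · have hlen : 0 < (pvCIdxN t).length := List.length_pos_of_ne_nil hl
        have ih' := ih hl
        have hlast : (0 :: (pvCIdxN t).map (· + 1)).getD ((0 :: (pvCIdxN t).map (· + 1)).length - 1) 0
            = (pvCIdxN t).getD ((pvCIdxN t).length - 1) 0 + 1 := by
          simp only [List.length_cons, List.length_map, Nat.add_sub_cancel]
          cases hn : (pvCIdxN t).length with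
          | zero => omega
          | succ m =>
            rw [List.getD_cons_succ, pvGetD_map_succ _ m (by omega)]
            simp
        rw [hlast]
        simp only [List.drop_succ_cons, List.length_cons]
        exact ⟨ih'.1, by have := ih'.2; omega⟩
    · simp only [pvCIdxN, hcat, Bool.false_eq_true, if_false, List.nil_append] at h ⊢
      have hl : pvCIdxN t ≠ [] := by simpa using h
      have hlen : 0 < (pvCIdxN t).length := List.length_pos_of_ne_nil hl
      have ih' := ih hl
      have hne : (pvChunks t).1 ≠ [] := by
        have h1 := pvCIdxN_length t
        have h2 := pvChunks_length t
        intro hc; rw [hc] at h2; simp at h2; omega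
      obtain ⟨c, cs, hc⟩ := List.exists_cons_of_ne_nil hne
      simp only [pvChunks, hcat, Bool.false_eq_true, if_false, hc]
      have hlast : ((pvCIdxN t).map (· + 1)).getD (((pvCIdxN t).map (· + 1)).length - 1) 0
          = (pvCIdxN t).getD ((pvCIdxN t).length - 1) 0 + 1 := by
        simp only [List.length_map]
        exact pvGetD_map_succ _ _ (by omega)
      rw [hlast]
      simp only [List.drop_succ_cons, List.length_cons]
      exact ⟨ih'.1, by have := ih'.2; omega⟩

theorem pvApply_length (r n : Int) :
    ∀ (ss : List (List pvEV)) (seen : Int) (phases : List (List (Int × List pvEV))),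
      (pvApply r n phases seen ss).length = phases.length := by
  intro ss
  induction ss with
  | nil => intro seen phases; rfl
  | cons c ss ih =>
    intro seen phases
    simp only [pvApply]
    rw [ih]
    split <;> simp

theorem pvApply_getElem? (r n : Int) :
    ∀ (ss : List (List pvEV)) (s : Nat) (phases : List (List (Int × List pvEV))),
      phases.length = n.toNat → ∀ j : Nat,
      (pvApply r n phases (s : Int) ss)[j]? =
        if s ≤ j ∧ j < s + ss.length then
          phases[j]?.map (fun ph => ph ++ [(r, ss.getD (j - s) [])])
        else phases[j]? := by
  intro ss
  induction ss with
  | nil =>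
    intro s phases hlen j
    simp only [List.length_nil, Nat.add_zero]
    rw [if_neg (by omega)]
    rfl
  | cons c ss ih =>
    intro s phases hlen j
    have hstep : pvApply r n phases (s : Int) (c :: ss)
        = pvApply r n (if (s : Int) < n then phases.modify s (fun ph => ph ++ [(r, c)]) else phases)
            (((s + 1 : Nat) : Int)) ss := by
      simp only [pvApply, Int.toNat_natCast]
      push_cast
      rfl
    rw [hstep, ih (s + 1) _ (by split <;> simp [hlen]) j]
    by_cases hjs : j = s
    · subst hjs
      have h1 : ¬(j + 1 ≤ j ∧ j < j + 1 + ss.length) := by omega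
      have h2 : j ≤ j ∧ j < j + (c :: ss).length := by simp only [List.length_cons]; omega
      rw [if_neg h1, if_pos h2]
      by_cases hsn : (j : Int) < n
      · rw [if_pos hsn, List.getElem?_modify]
        cases hj : phases[j]? <;> simp
      · rw [if_neg hsn]
        have hnone : phases[j]? = none := by rw [List.getElem?_eq_none_iff]; omega
        simp [hnone]
    · have hsame : (if (s : Int) < n then phases.modify s (fun ph => ph ++ [(r, c)]) else phases)[j]? = phases[j]? := by
        split
        · rw [List.getElem?_modify]
          cases hj : phases[j]? with
          | none => rfl
          | some a => simp [show ¬ s = j from fun h => hjs h.symm]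
        · rfl
      rw [hsame]
      by_cases hc2 : s ≤ j ∧ j < s + (c :: ss).length
      · have h1 : s + 1 ≤ j ∧ j < s + 1 + ss.length := by
          simp only [List.length_cons] at hc2
          omega
        have hgd : ss.getD (j - (s + 1)) [] = (c :: ss).getD (j - s) [] := by
          have hj1 : j - s = (j - (s + 1)) + 1 := by omega
          rw [hj1, List.getD_cons_succ]
        rw [if_pos h1, if_pos hc2, hgd]
      · have h1 : ¬(s + 1 ≤ j ∧ j < s + 1 + ss.length) := by
          simp only [List.length_cons] at hc2
          omega
        rw [if_neg h1, if_neg hc2]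

theorem pvFoldApply_getElem? (n : Int) (C : Int → List (List pvEV)) :
    ∀ (L : List Int) (phases : List (List (Int × List pvEV))),
      phases.length = n.toNat → ∀ j : Nat,
      (L.foldl (fun ph r => pvApply r n ph 0 (C r)) phases)[j]? =
        phases[j]?.map (fun ph =>
          ph ++ (L.filter (fun r => decide (j < (C r).length))).map (fun r => (r, (C r).getD j []))) := by
  intro L
  induction L with
  | nil =>
    intro phases hlen j
    cases hj : phases[j]? with
    | none => rw [List.foldl_nil, hj]; rfl
    | some v => rw [List.foldl_nil, hj]; simp
  | cons a L ih =>
    intro phases hlen j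
    rw [List.foldl_cons, ih _ (by rw [pvApply_length]; exact hlen) j]
    have h0 := pvApply_getElem? a n (C a) 0 phases hlen j
    simp only [Nat.cast_zero, Nat.zero_add, Nat.zero_le, true_and, Nat.sub_zero] at h0
    rw [h0]
    rw [List.filter_cons]
    by_cases hc : j < (C a).length
    · rw [if_pos hc, if_pos (by simpa using hc)]
      cases hj : phases[j]? <;> simp
    · rw [if_neg hc, if_neg (by simpa using hc)]

theorem pvFoldl_append_ite {β : Type} (P : Int → Prop) [DecidablePred P] (f : Int → β) :
    ∀ (L : List Int) (acc : List β),
      L.foldl (fun acc x => if P x then acc ++ [f x] else acc) acc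
        = acc ++ (L.filter (fun x => decide (P x))).map f := by
  intro L
  induction L with
  | nil => intro acc; simp
  | cons a L ih =>
    intro acc
    rw [List.foldl_cons, ih, List.filter_cons]
    by_cases h : P a
    · rw [if_pos h, if_pos (by simpa using h)]
      simp
    · rw [if_neg h, if_neg (by simpa using h)]

theorem pvDict_getD_mk_map (f : Int → List Int) (x : Int) :
    ∀ L : List Int,
      PySem.Dict.getD (PySem.Dict.mk (L.map (fun r => (r, f r)))) x []
        = if x ∈ L then f x else [] := by
  intro L
  induction L with
  | nil => simp [PySem.Dict.getD, PySem.Dict.get?]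
  | cons a L ih =>
    simp only [List.map_cons]
    by_cases h : a = x
    · subst h
      simp [PySem.Dict.getD, PySem.Dict.get?_mk_cons]
    · rw [show PySem.Dict.getD (PySem.Dict.mk ((a, f a) :: L.map (fun r => (r, f r)))) x []
            = PySem.Dict.getD (PySem.Dict.mk (L.map (fun r => (r, f r)))) x [] from by
          simp [PySem.Dict.getD, PySem.Dict.get?_mk_cons, h]]
      rw [ih]
      simp [show ¬ x = a from fun hh => h hh.symm]

theorem pvGetD_cast (l : List Nat) (k : Nat) (h : k < l.length) :
    (l.map (fun n : Nat => (n : Int))).getD k 0 = (l.getD k 0 : Int) := by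
  rw [List.getD_eq_getElem _ _ (by simpa using h), List.getD_eq_getElem _ _ h, List.getElem_map]

theorem pvLast_cast (l : List Nat) (h : l ≠ []) :
    (l.map (fun n : Nat => (n : Int))).getLast (by simpa using h) = (l.getD (l.length - 1) 0 : Int) := by
  rw [List.getLast_eq_getElem, List.getD_eq_getElem _ _ (Nat.sub_lt (List.length_pos_of_ne_nil h) one_pos)]
  simp

theorem pvLen_eq (evs : List pvEV) : (pvCIdxN evs).length = ((pvChunks evs).1).length := by
  rw [pvCIdxN_length, pvChunks_length]

theorem pvStart_cast (evs : List pvEV) (j : Nat) (hj : j < (pvCIdxN evs).length) :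
    (if 0 < ((j : Nat) : Int) then
        PySem.List.pyGetD ((pvCIdxN evs).map (fun n : Nat => (n : Int))) ((j : Int) - 1) 0 + 1
      else 0) = ((pvStartN (pvCIdxN evs) j : Nat) : Int) := by
  cases j with
  | zero => simp [pvStartN]
  | succ k =>
    rw [if_pos (by push_cast; omega)]
    have h1 : ((k + 1 : Nat) : Int) - 1 = ((k : Nat) : Int) := by push_cast; ring
    rw [h1, PySem.List.pyGetD_natCast, pvGetD_cast _ k (by omega)]
    simp [pvStartN]

theorem pvPhaseVal (evs : List pvEV) (j : Nat) (hj : j < (pvCIdxN evs).length) :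
    PySem.List.slice evs
      (some (if 0 < ((j : Nat) : Int) then
          PySem.List.pyGetD ((pvCIdxN evs).map (fun n : Nat => (n : Int))) ((j : Int) - 1) 0 + 1
        else 0))
      (some (PySem.List.pyGetD ((pvCIdxN evs).map (fun n : Nat => (n : Int))) (j : Int) 0 + 1))
      = ((pvChunks evs).1).getD j [] := by
  rw [pvStart_cast evs j hj, PySem.List.pyGetD_natCast, pvGetD_cast _ j hj]
  have h2 : ((pvCIdxN evs).getD j 0 : Int) + 1 = (((pvCIdxN evs).getD j 0 + 1 : Nat) : Int) := by
    push_cast; ring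
  rw [h2, PySem.List.slice_natCast]
  exact pvSlice_chunk evs j hj

theorem pvLast_idx (evs : List pvEV) (h : pvCIdxN evs ≠ []) :
    PySem.List.pyGetD ((pvCIdxN evs).map (fun n : Nat => (n : Int))) (-1) 0
      = ((pvCIdxN evs).getD ((pvCIdxN evs).length - 1) 0 : Int) := by
  rw [PySem.List.pyGetD_neg_one _ _ (by simpa using h)]
  exact pvLast_cast _ h


theorem pvColA (per_rank : List (Int × List pvEV)) (nproc : Int) (j : Nat) :
    List.foldl (fun phase r =>
      if (j : Int) < (((if r ∈ PySem.List.pyRange 0 nproc 1 then pvCollIdx (pvEvts per_rank r) else []).length : Nat) : Int) then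
        phase ++ [(r, PySem.List.slice (pvEvts per_rank r)
          (some (if 0 < (j : Int) then
              PySem.List.pyGetD (if r ∈ PySem.List.pyRange 0 nproc 1 then pvCollIdx (pvEvts per_rank r) else []) ((j : Int) - 1) 0 + 1
            else 0))
          (some (PySem.List.pyGetD (if r ∈ PySem.List.pyRange 0 nproc 1 then pvCollIdx (pvEvts per_rank r) else []) (j : Int) 0 + 1)))]
      else phase) [] (PySem.List.pyRange 0 nproc 1)
    = ((PySem.List.pyRange 0 nproc 1).filter (fun r => decide (j < ((pvChunks (pvEvts per_rank r)).1).length))).map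
        (fun r => (r, ((pvChunks (pvEvts per_rank r)).1).getD j [])) := by
  rw [PySem.List.foldl_congr_mem _ _ (fun phase r =>
      if j < ((pvChunks (pvEvts per_rank r)).1).length then
        phase ++ [(r, ((pvChunks (pvEvts per_rank r)).1).getD j [])] else phase) []
    (by
      intro acc r hr
      beta_reduce
      rw [if_pos hr, pvCollIdx_eq]
      by_cases hc : j < (pvCIdxN (pvEvts per_rank r)).length
      · rw [if_pos (show ((j : Nat) : Int) < ((((pvCIdxN (pvEvts per_rank r)).map (fun n : Nat => (n : Int))).length : Nat) : Int) by
              simp only [List.length_map]; exact_mod_cast hc),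
            if_pos (show j < ((pvChunks (pvEvts per_rank r)).1).length by rw [← pvLen_eq]; exact hc),
            pvPhaseVal (pvEvts per_rank r) j hc]
      · rw [if_neg (show ¬ (((j : Nat) : Int) < ((((pvCIdxN (pvEvts per_rank r)).map (fun n : Nat => (n : Int))).length : Nat) : Int)) by
              simp only [List.length_map]; exact_mod_cast hc),
            if_neg (show ¬ j < ((pvChunks (pvEvts per_rank r)).1).length by rw [← pvLen_eq]; exact hc)])]
  rw [pvFoldl_append_ite]
  simp

theorem pvColLast (per_rank : List (Int × List pvEV)) (nproc : Int) :
    List.foldl (fun lp r =>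
      if (if r ∈ PySem.List.pyRange 0 nproc 1 then pvCollIdx (pvEvts per_rank r) else []) ≠ [] then
        if PySem.List.pyGetD (if r ∈ PySem.List.pyRange 0 nproc 1 then pvCollIdx (pvEvts per_rank r) else []) (-1) 0 + 1
            < ((pvEvts per_rank r).length : Int) then
          lp ++ [(r, PySem.List.slice (pvEvts per_rank r)
            (some (PySem.List.pyGetD (if r ∈ PySem.List.pyRange 0 nproc 1 then pvCollIdx (pvEvts per_rank r) else []) (-1) 0 + 1)))]
        else lp
      else lp) [] (PySem.List.pyRange 0 nproc 1)
    = List.foldl (fun lp r =>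
        if 0 < ((pvChunks (pvEvts per_rank r)).1).length ∧ (pvChunks (pvEvts per_rank r)).2 ≠ [] then
          lp ++ [(r, (pvChunks (pvEvts per_rank r)).2)] else lp) [] (PySem.List.pyRange 0 nproc 1) := by
  apply PySem.List.foldl_congr_mem
  intro lp r hr
  rw [if_pos hr, pvCollIdx_eq]
  by_cases hl : pvCIdxN (pvEvts per_rank r) = []
  · rw [hl]
    rw [if_neg (by simp), if_neg (by
      intro hx
      have := hx.1
      rw [pvChunks_length, ← pvCIdxN_length, hl] at this
      simp at this)]
  · have hmapne : (pvCIdxN (pvEvts per_rank r)).map (fun n : Nat => (n : Int)) ≠ [] := by simpa using hl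
    rw [pvLast_idx _ hl, if_pos hmapne]
    have hdl := pvDrop_last (pvEvts per_rank r) hl
    have h2 := hdl.2
    have hGlt : (((pvCIdxN (pvEvts per_rank r)).getD ((pvCIdxN (pvEvts per_rank r)).length - 1) 0 : Nat) : Int) + 1
        < ((pvEvts per_rank r).length : Int) ↔ (pvChunks (pvEvts per_rank r)).2 ≠ [] := by
      constructor
      · intro hlt heq
        rw [heq] at h2
        simp only [List.length_nil, Nat.add_zero] at h2
        omega
      · intro hne
        have := List.length_pos_of_ne_nil hne
        omega
    by_cases hlo : (pvChunks (pvEvts per_rank r)).2 ≠ []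
    · rw [if_pos (hGlt.mpr hlo),
          if_pos (⟨by rw [pvChunks_length, ← pvCIdxN_length]; exact List.length_pos_of_ne_nil hl, hlo⟩ :
            0 < ((pvChunks (pvEvts per_rank r)).1).length ∧ (pvChunks (pvEvts per_rank r)).2 ≠ [])]
      have hcast : (((pvCIdxN (pvEvts per_rank r)).getD ((pvCIdxN (pvEvts per_rank r)).length - 1) 0 : Nat) : Int) + 1
          = (((pvCIdxN (pvEvts per_rank r)).getD ((pvCIdxN (pvEvts per_rank r)).length - 1) 0 + 1 : Nat) : Int) := by
        push_cast; ring
      rw [hcast, PySem.List.slice_from_natCast, hdl.1]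
    · rw [if_neg (fun hx => hlo (hGlt.mp hx)), if_neg (fun hx => hlo hx.2)]

theorem pvBsplit (per_rank : List (Int × List pvEV)) (nproc : Int) (n : Int)
    (init1 : List (List (Int × List pvEV))) (init2 : List (Int × List pvEV)) :
    List.foldl (fun st r =>
        ((List.foldl (pvSegStep r n) (st.1, [], 0) (pvEvts per_rank r)).1,
          if 0 < (List.foldl (pvSegStep r n) (st.1, [], 0) (pvEvts per_rank r)).2.2 ∧
              (List.foldl (pvSegStep r n) (st.1, [], 0) (pvEvts per_rank r)).2.1 ≠ [] then
            st.2 ++ [(r, (List.foldl (pvSegStep r n) (st.1, [], 0) (pvEvts per_rank r)).2.1)]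
          else st.2))
      (init1, init2) (PySem.List.pyRange 0 nproc 1)
    = (List.foldl (fun ph r => pvApply r n ph 0 ((pvChunks (pvEvts per_rank r)).1)) init1 (PySem.List.pyRange 0 nproc 1),
       List.foldl (fun lp r =>
          if 0 < ((pvChunks (pvEvts per_rank r)).1).length ∧ (pvChunks (pvEvts per_rank r)).2 ≠ [] then
            lp ++ [(r, (pvChunks (pvEvts per_rank r)).2)] else lp) init2 (PySem.List.pyRange 0 nproc 1)) := by
  rw [PySem.List.foldl_congr_mem _ _ (fun st r =>
      (pvApply r n st.1 0 ((pvChunks (pvEvts per_rank r)).1),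
        if 0 < ((pvChunks (pvEvts per_rank r)).1).length ∧ (pvChunks (pvEvts per_rank r)).2 ≠ [] then
          st.2 ++ [(r, (pvChunks (pvEvts per_rank r)).2)] else st.2))
    (init1, init2)
    (by
      intro st r _
      beta_reduce
      rw [pvFold_segStep r n (pvEvts per_rank r) [] 0 st.1, pvSegs_nil_eq]
      simp only [zero_add]
      by_cases hcc : 0 < ((pvChunks (pvEvts per_rank r)).1).length ∧ (pvChunks (pvEvts per_rank r)).2 ≠ []
      · rw [if_pos (⟨by exact_mod_cast hcc.1, hcc.2⟩ :
            0 < ((((pvChunks (pvEvts per_rank r)).1).length : Nat) : Int) ∧ (pvChunks (pvEvts per_rank r)).2 ≠ []),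
          if_pos hcc]
      · rw [if_neg (show ¬ (0 < ((((pvChunks (pvEvts per_rank r)).1).length : Nat) : Int) ∧ (pvChunks (pvEvts per_rank r)).2 ≠ []) by
            intro hx; exact hcc ⟨by exact_mod_cast hx.1, hx.2⟩), if_neg hcc])]
  rw [PySem.List.foldl_prod_mk
        (fun a r => pvApply r n a 0 ((pvChunks (pvEvts per_rank r)).1))
        (fun b r =>
          if 0 < ((pvChunks (pvEvts per_rank r)).1).length ∧ (pvChunks (pvEvts per_rank r)).2 ≠ [] then
            b ++ [(r, (pvChunks (pvEvts per_rank r)).2)] else b)]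

-- ===== VERDICT (by name: the statement is the Claim_ definition above) =====
theorem extract_phases_py_spec : Claim_equal_extract_phases_py := by
  intro per_rank nproc _ _
  unfold Spec_extract_phases_py
  show extract_phases_py per_rank nproc = extract_phases_py_alt per_rank nproc
  simp only [extract_phases_py, extract_phases_py_alt]
  simp only [pvDict_getD_mk_map]
  by_cases hnp : 0 < nproc
  case neg =>
    have h0nmem : (0 : Int) ∉ PySem.List.pyRange 0 nproc 1 := by
      rw [PySem.List.mem_pyRange_one]; omega
    rw [if_neg h0nmem, if_neg hnp]
    simp
  case pos =>
  have h0mem : (0 : Int) ∈ PySem.List.pyRange 0 nproc 1 :=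
    PySem.List.mem_pyRange_one.mpr ⟨le_refl 0, hnp⟩
  rw [if_pos h0mem, if_pos hnp]
  rw [pvCollIdx_eq]
  rw [show (pvEvts per_rank 0).countP (fun ev => ev.1 == "collective")
        = (pvCIdxN (pvEvts per_rank 0)).length from (pvCIdxN_length _).symm]
  by_cases hz : pvCIdxN (pvEvts per_rank 0) = []
  case pos =>
    rw [if_pos (show ((pvCIdxN (pvEvts per_rank 0)).map (fun n : Nat => (n : Int))) = [] by simp [hz]),
        if_pos (show ((pvCIdxN (pvEvts per_rank 0)).length : Int) = 0 by simp [hz])]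
  case neg =>
  rw [if_neg (show ¬ ((pvCIdxN (pvEvts per_rank 0)).map (fun n : Nat => (n : Int))) = [] by simp [hz]),
      if_neg (show ¬ ((pvCIdxN (pvEvts per_rank 0)).length : Int) = 0 by
        have := List.length_pos_of_ne_nil hz; omega)]
  simp only [List.length_map]
  rw [PySem.List.pyRange_zero_natCast]
  rw [List.foldl_map]
  rw [PySem.List.foldl_append_singleton_eq_map]
  simp only [List.nil_append]
  rw [List.map_congr_left (fun (j : Nat) _ => pvColA per_rank nproc j)]
  rw [pvBsplit per_rank nproc ((pvCIdxN (pvEvts per_rank 0)).length : Int)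
        (List.replicate ((pvCIdxN (pvEvts per_rank 0)).length : Int).toNat []) []]
  dsimp only
  simp only [Int.toNat_natCast]
  rw [pvColLast per_rank nproc]
  have hph : (List.range (pvCIdxN (pvEvts per_rank 0)).length).map
        (fun j => ((PySem.List.pyRange 0 nproc 1).filter
            (fun r => decide (j < ((pvChunks (pvEvts per_rank r)).1).length))).map
          (fun r => (r, ((pvChunks (pvEvts per_rank r)).1).getD j [])))
      = List.foldl (fun ph r => pvApply r ((pvCIdxN (pvEvts per_rank 0)).length : Int) ph 0 ((pvChunks (pvEvts per_rank r)).1))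
          (List.replicate (pvCIdxN (pvEvts per_rank 0)).length []) (PySem.List.pyRange 0 nproc 1) := by
    apply List.ext_getElem?
    intro j
    rw [pvFoldApply_getElem? ((pvCIdxN (pvEvts per_rank 0)).length : Int)
          (fun r => (pvChunks (pvEvts per_rank r)).1) _ _ (by simp) j]
    by_cases hj : j < (pvCIdxN (pvEvts per_rank 0)).length
    · rw [List.getElem?_map, List.getElem?_range hj, List.getElem?_replicate]
      simp [hj]
    · rw [List.getElem?_map, List.getElem?_replicate, if_neg hj]
      have h1 : (List.range (pvCIdxN (pvEvts per_rank 0)).length)[j]? = none := by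
        rw [List.getElem?_eq_none_iff]
        simpa using hj
      rw [h1]
      rfl
  rw [hph]
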